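-- pv_equiv track=rewrite | github.com/seba1204/cours | prepa/ptsi/info/tp/tp-07/Exercice 6/Exercice_6_Q2.py | nbLettresDansChaine
-- ===== SOURCE A (Python) =====
-- def compteCaraDansChaine(chaine:str):
--     Compte=[]
--     C=0
--     for a in range(97,123):
--         for i in chaine:
--             if (i==chr(a)):
--                 C+=1
--         Compte.append(C)
--         C=0
--     return Compte
--
-- def nbLettresDansChaine(chaine:str):
--     Min="abcdefghijklmnopqrstuvwxyz"
--     tableauRetour = ""
--     tableauNombre = []
--     tableauNombre = compteCaraDansChaine(chaine)
--     i=0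
--     for char in Min:
--         tableauRetour+= char + "  :  " + str(tableauNombre[i]) + "\n"
--         i+=1
--     return tableauRetour
-- ===== SOURCE B (Python) =====
-- def nbLettresDansChaine(chaine: str):
--     # One pass: tally every character once, then look up the 26 letters.
--     counts = {}
--     for c in chaine:
--         counts[c] = counts.get(c, 0) + 1
--     return "".join(ch + "  :  " + str(counts.get(ch, 0)) + "\n"
--                    for ch in "abcdefghijklmnopqrstuvwxyz")
-- ===== Notes on version B (the rewrite author's own statement) =====
-- stated objective: faster
-- what changed: A scans the whole string once per letter (26 passes plus a counter list); B makes a single pass building a dict counter and then formats the 26 lines from dict lookups via join.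
import Mathlib
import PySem

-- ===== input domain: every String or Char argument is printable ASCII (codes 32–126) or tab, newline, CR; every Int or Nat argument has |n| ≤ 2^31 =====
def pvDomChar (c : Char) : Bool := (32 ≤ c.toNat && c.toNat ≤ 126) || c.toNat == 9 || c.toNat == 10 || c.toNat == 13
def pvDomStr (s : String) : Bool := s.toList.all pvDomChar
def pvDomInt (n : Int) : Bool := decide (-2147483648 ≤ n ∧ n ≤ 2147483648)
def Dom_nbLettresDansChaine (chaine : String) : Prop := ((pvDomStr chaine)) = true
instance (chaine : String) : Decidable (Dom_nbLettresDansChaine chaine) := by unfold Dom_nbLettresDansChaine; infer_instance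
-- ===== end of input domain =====

-- B replaces A's 26 passes over the string (one pass per letter) by a single counting
-- pass into a dict, then formats the 26 report lines from dict lookups (objective: faster).

-- ===== PORT A =====
def compteCaraDansChaine (chaine : String) : List Int :=
  (PySem.List.pyRange 97 123 1).foldl
    (fun (Compte : List Int) a =>
      Compte ++ [chaine.toList.foldl
        (fun (C : Int) i => if i == Char.ofNat a.toNat then C + 1 else C) 0])
    []

def nbLettresDansChaine (chaine : String) : String :=
  let tableauNombre := compteCaraDansChaine chaine
  String.ofList <|
    (PySem.List.enumerate "abcdefghijklmnopqrstuvwxyz".toList).foldl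
      (fun (tableauRetour : List Char) p =>
        tableauRetour ++ [p.2] ++ "  :  ".toList
          ++ PySem.Int.toChars (PySem.List.pyGetD tableauNombre p.1 0) ++ ['\n'])
      []

-- ===== PORT B =====
def nbLettresDansChaine_alt (chaine : String) : String :=
  let counts : PySem.Dict Char Int :=
    chaine.toList.foldl (fun d c => d.modify c 0 (· + 1)) PySem.Dict.empty
  PySem.Str.join "" <|
    "abcdefghijklmnopqrstuvwxyz".toList.map (fun ch =>
      String.ofList ([ch] ++ "  :  ".toList
        ++ PySem.Int.toChars (counts.getD ch 0) ++ ['\n']))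

-- ===== PRECONDITION & SPEC =====
def Spec_nbLettresDansChaine (chaine : String) (out : String) : Prop := out = nbLettresDansChaine_alt chaine
instance (chaine : String) (out : String) : Decidable (Spec_nbLettresDansChaine chaine out) := by unfold Spec_nbLettresDansChaine; infer_instance

-- ===== CLAIM (what is proved, stated in full; the proofs are below) =====
def Claim_equal_nbLettresDansChaine : Prop := ∀ (chaine : String), Dom_nbLettresDansChaine chaine → Spec_nbLettresDansChaine chaine (nbLettresDansChaine chaine)

-- ===== LEMMAS AND PROOFS =====

-- B's dict lookup is the number of occurrences in the string.
theorem counts_getD (chaine : String) (ch : Char) :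
    (chaine.toList.foldl (fun d c => d.modify c 0 (· + 1))
      (PySem.Dict.empty : PySem.Dict Char Int)).getD ch 0
      = (chaine.toList.count ch : Int) := by
  rw [PySem.Dict.getD_foldl_modify_add_one]
  simp

-- A's inner counting loop is the number of occurrences in the string.
theorem count_fold (xs : List Char) (c : Char) :
    xs.foldl (fun (C : Int) i => if i == c then C + 1 else C) 0 = (xs.count c : Int) := by
  simp [pysem]
  rw [show (fun x : Char => decide (x = c)) = (fun x => x == c) from by
    funext x; cases h : x == c <;> simp_all]
  simp [List.count, List.countP_eq_length_filter]

-- A's table is the per-letter occurrence counts, in code order.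
theorem table_eq (chaine : String) :
    compteCaraDansChaine chaine
      = (PySem.List.pyRange 97 123 1).map
          (fun a => (chaine.toList.count (Char.ofNat a.toNat) : Int)) := by
  unfold compteCaraDansChaine
  rw [PySem.List.foldl_append_singleton_eq_map]
  exact List.map_congr_left fun a _ => count_fold chaine.toList (Char.ofNat a.toNat)

-- The two formatting loops agree for ANY per-letter count function f.
theorem format_eq (f : Char → Int) :
    String.ofList ((PySem.List.enumerate "abcdefghijklmnopqrstuvwxyz".toList).foldl
      (fun (ret : List Char) p => ret ++ [p.2] ++ "  :  ".toList ++ PySem.Int.toChars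
         (PySem.List.pyGetD ((PySem.List.pyRange 97 123 1).map (fun a => f (Char.ofNat a.toNat))) p.1 0) ++ ['\n']) [])
    = PySem.Str.join "" ("abcdefghijklmnopqrstuvwxyz".toList.map (fun ch =>
        String.ofList ([ch] ++ "  :  ".toList ++ PySem.Int.toChars (f ch) ++ ['\n']))) := by
  have hr : PySem.List.pyRange 97 123 1
      = [97,98,99,100,101,102,103,104,105,106,107,108,109,110,111,112,113,114,115,116,117,118,119,120,121,122] := by decide
  have hs : "abcdefghijklmnopqrstuvwxyz".toList
      = ['a','b','c','d','e','f','g','h','i','j','k','l','m','n','o','p','q','r','s','t','u','v','w','x','y','z'] := by decide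
  have h0 : "".toList = ([] : List Char) := by decide
  rw [hr, hs]
  unfold PySem.Str.join
  refine congrArg String.ofList ?_
  set_option maxRecDepth 10000 in
  simp [PySem.List.enumerate, PySem.List.pyGetD, PySem.List.pyGet?, PySem.List.pyIdx?,
    PySem.Chars.join, Char.ofNat, Nat.isValidChar, h0, List.intercalate, List.intersperse, List.flatten]

-- ===== VERDICT (by name: the statement is the Claim_ definition above) =====
theorem nbLettresDansChaine_spec : Claim_equal_nbLettresDansChaine := by
  intro chaine _
  show nbLettresDansChaine chaine = nbLettresDansChaine_alt chaine
  unfold nbLettresDansChaine nbLettresDansChaine_alt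
  simp only [counts_getD, table_eq]
  exact format_eq (fun ch => (chaine.toList.count ch : Int))
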